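-- pv_equiv track=rewrite | github.com/SlimWojak/research_accelerator | src/ra/engine/cascade.py | _get_transitive_downstream
-- ===== SOURCE A (Python) =====
-- from collections import defaultdict
--
-- def _get_transitive_downstream(
--     graph: dict[str, list[str]], nodes: set[str]
-- ) -> set[str]:
--     """Get all transitive downstream nodes from a set of starting nodes.
--
--     Args:
--         graph: Mapping of node -> list of upstream dependencies.
--         nodes: Starting set of nodes to find downstream for.
--
--     Returns:
--         Set of all downstream nodes (NOT including the starting nodes).
--     """
--     # Build downstream adjacency
--     downstream: dict[str, set[str]] = defaultdict(set)
--     for node, upstreams in graph.items():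
--         for up in upstreams:
--             downstream[up].add(node)
--
--     visited: set[str] = set()
--     queue = list(nodes)
--
--     while queue:
--         current = queue.pop(0)
--         for child in downstream.get(current, set()):
--             if child not in visited:
--                 visited.add(child)
--                 queue.append(child)
--
--     return visited
-- ===== SOURCE B (Python) =====
-- def _get_transitive_downstream(graph, nodes):
--     """No reverse-adjacency map: a growing worklist with an index cursor,
--     finding each node's dependents by scanning graph.items() directly."""
--     order = list(nodes)
--     visited = set()
--     i = 0
--     while i < len(order):
--         cur = order[i]
--         i += 1
--         for node, ups in graph.items():
--             if node not in visited and cur in ups: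
--                 visited.add(node)
--                 order.append(node)
--     return visited
-- ===== Notes on version B (the rewrite author's own statement) =====
-- stated objective: alternative
-- what changed: B drops A's reverse-adjacency defaultdict build entirely and replaces the FIFO queue with pop(0) by an append-only worklist traversed by an index cursor, discovering each node's dependents by scanning graph.items() on the fly.
import Mathlib
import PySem

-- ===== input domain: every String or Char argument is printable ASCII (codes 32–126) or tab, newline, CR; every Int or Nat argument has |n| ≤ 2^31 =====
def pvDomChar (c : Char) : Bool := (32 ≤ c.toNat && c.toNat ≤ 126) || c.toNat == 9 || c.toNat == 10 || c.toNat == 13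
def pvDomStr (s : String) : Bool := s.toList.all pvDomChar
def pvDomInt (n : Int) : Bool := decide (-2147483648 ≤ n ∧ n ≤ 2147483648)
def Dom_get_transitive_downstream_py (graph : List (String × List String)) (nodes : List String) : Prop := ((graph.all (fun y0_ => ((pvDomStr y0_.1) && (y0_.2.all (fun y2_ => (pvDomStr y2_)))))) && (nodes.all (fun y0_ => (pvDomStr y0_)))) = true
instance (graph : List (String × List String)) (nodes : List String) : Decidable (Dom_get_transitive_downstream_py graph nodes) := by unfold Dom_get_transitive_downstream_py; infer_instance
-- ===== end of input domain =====

-- B drops A's reverse-adjacency build and FIFO queue: an index-cursor worklist with a direct scan of graph.items() per node ("alternative", not faster). Return value is a Python set; both ports list its elements in their insertion order.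


-- ===== PORT A =====
-- reverse adjacency: for node, upstreams in graph.items(): for up in upstreams: downstream[up].add(node)
def pvBuildDownstream (graph : List (String × List String)) : PySem.Dict String (PySem.Set String) :=
  (PySem.Dict.ofList graph).items.foldl
    (fun d p => p.2.foldl (fun d up => d.modify up PySem.Set.empty (fun s => PySem.Set.add s p.1)) d)
    PySem.Dict.empty

-- while queue: current = queue.pop(0); for child in downstream.get(current, set()): if child not in visited: add+append
-- fuel: one unit per loop iteration; iterations = len(start queue) + number of distinct nodes ever enqueued
-- ≤ nodes.length + graph.length, so the fuel below is always enough.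
def pvAQueueLoop (down : PySem.Dict String (PySem.Set String)) :
    Nat → List String → PySem.Set String → PySem.Set String
  | 0, _, visited => visited
  | _ + 1, [], visited => visited
  | fuel + 1, current :: queue, visited =>
      let st := (down.getD current PySem.Set.empty).foldl
        (fun (st : PySem.Set String × List String) child =>
          if PySem.Set.contains st.1 child then st
          else (PySem.Set.add st.1 child, st.2 ++ [child]))
        (visited, queue)
      pvAQueueLoop down fuel st.2 st.1

def get_transitive_downstream_py (graph : List (String × List String)) (nodes : List String) : List String :=
  pvAQueueLoop (pvBuildDownstream graph) (nodes.length + graph.length) nodes PySem.Set.empty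

-- ===== PORT B =====
-- while i < len(order): cur = order[i]; i += 1;
--   for node, ups in graph.items(): if node not in visited and cur in ups: visited.add(node); order.append(node)
-- fuel: one unit per while-iteration; iterations = final len(order) ≤ nodes.length + graph.length (appends only
-- of never-visited graph keys), so the fuel below is always enough.
def pvBScanLoop (items : List (String × List String)) :
    Nat → List String → Nat → PySem.Set String → PySem.Set String
  | 0, _, _, visited => visited
  | fuel + 1, order, i, visited =>
      if i < order.length then
        let cur := order.getD i ""
        let st := items.foldl
          (fun (st : PySem.Set String × List String) p =>
            if PySem.Set.contains st.1 p.1 = false ∧ p.2.contains cur = true then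
              (PySem.Set.add st.1 p.1, st.2 ++ [p.1])
            else st)
          (visited, order)
        pvBScanLoop items fuel st.2 (i + 1) st.1
      else visited

def get_transitive_downstream_py_alt (graph : List (String × List String)) (nodes : List String) : List String :=
  pvBScanLoop (PySem.Dict.ofList graph).items (nodes.length + graph.length) nodes 0 PySem.Set.empty

-- ===== PRECONDITION & SPEC =====
def Spec_get_transitive_downstream_py (graph : List (String × List String)) (nodes : List String) (out : List String) : Prop := out = get_transitive_downstream_py_alt graph nodes
instance (graph : List (String × List String)) (nodes : List String) (out : List String) : Decidable (Spec_get_transitive_downstream_py graph nodes out) := by unfold Spec_get_transitive_downstream_py; infer_instance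

-- ===== CLAIM (what is proved, stated in full; the proofs are below) =====
def Claim_equal_get_transitive_downstream_py : Prop := ∀ (graph : List (String × List String)) (nodes : List String), Dom_get_transitive_downstream_py graph nodes → Spec_get_transitive_downstream_py graph nodes (get_transitive_downstream_py graph nodes)

-- ===== LEMMAS AND PROOFS =====

-- A's per-child step (the inner body of A's while loop)
def pvStep (st : PySem.Set String × List String) (child : String) : PySem.Set String × List String :=
  if PySem.Set.contains st.1 child then st
  else (PySem.Set.add st.1 child, st.2 ++ [child])

-- B's per-item step for a fixed dequeued node cur
def pvBStep (cur : String) (st : PySem.Set String × List String) (p : String × List String) :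
    PySem.Set String × List String :=
  if PySem.Set.contains st.1 p.1 = false ∧ p.2.contains cur = true then
    (PySem.Set.add st.1 p.1, st.2 ++ [p.1])
  else st

-- the accumulator (second component) is append-only and does not influence the run
theorem foldl_pvStep_acc (cs : List String) (v : PySem.Set String) (a b : List String) :
    cs.foldl pvStep (v, a ++ b) = ((cs.foldl pvStep (v, b)).1, a ++ (cs.foldl pvStep (v, b)).2) := by
  induction cs generalizing v b with
  | nil => rfl
  | cons c cs ih =>
      simp only [List.foldl_cons, pvStep]
      by_cases h : c ∈ v
      · rw [if_pos (by simpa [PySem.Set.contains_iff]), if_pos (by simpa [PySem.Set.contains_iff])]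
        exact ih v b
      · rw [if_neg (by simpa [PySem.Set.contains_iff]), if_neg (by simpa [PySem.Set.contains_iff])]
        simpa [List.append_assoc] using ih (PySem.Set.add v c) (b ++ [c])

-- the inner build over one item's upstream list, seen at an arbitrary key cur
theorem pvBuildInner_getD (cur node : String) (ups : List String) :
    ∀ d : PySem.Dict String (PySem.Set String),
    (ups.foldl (fun d up => d.modify up PySem.Set.empty (fun s => PySem.Set.add s node)) d).getD cur PySem.Set.empty
      = if cur ∈ ups ∧ node ∉ d.getD cur PySem.Set.empty
        then d.getD cur PySem.Set.empty ++ [node] else d.getD cur PySem.Set.empty := by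
  induction ups with
  | nil => intro d; simp
  | cons up ups ih =>
      intro d
      rw [List.foldl_cons, ih]
      rw [PySem.Dict.getD_modify]
      by_cases hk : cur = up
      · rw [if_pos hk]
        subst hk
        by_cases hn : node ∈ d.getD cur PySem.Set.empty
        · rw [PySem.Set.add_of_mem hn, if_neg (fun h => h.2 hn), if_neg (fun h => h.2 hn)]
        · rw [PySem.Set.add_of_not_mem hn]
          have hmem : node ∈ d.getD cur PySem.Set.empty ++ [node] := by simp
          rw [if_neg (fun h => h.2 hmem), if_pos ⟨List.mem_cons_self, hn⟩]
      · rw [if_neg hk]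
        by_cases hc : cur ∈ ups ∧ node ∉ d.getD cur PySem.Set.empty
        · rw [if_pos hc, if_pos ⟨List.mem_cons_of_mem _ hc.1, hc.2⟩]
        · rw [if_neg hc]
          by_cases hn : node ∉ d.getD cur PySem.Set.empty
          · have hu : cur ∉ ups := fun h => hc ⟨h, hn⟩
            rw [if_neg (fun h => (by rcases List.mem_cons.mp h.1 with h' | h'; exact hk h'; exact hu h' : False))]
          · rw [if_neg (fun h => hn h.2)]

-- the built reverse adjacency, read at cur, is exactly the graph keys whose upstream list contains cur
theorem pvBuild_getD_aux (cur : String) :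
    ∀ (items : List (String × List String)) (d : PySem.Dict String (PySem.Set String)),
    (items.map Prod.fst).Nodup →
    (∀ q ∈ items, ∀ k, q.1 ∉ d.getD k PySem.Set.empty) →
    (items.foldl (fun d p => p.2.foldl (fun d up => d.modify up PySem.Set.empty (fun s => PySem.Set.add s p.1)) d) d).getD cur PySem.Set.empty
      = d.getD cur PySem.Set.empty ++ (items.filter (fun p => p.2.contains cur)).map Prod.fst := by
  intro items
  induction items with
  | nil => intro d _ _; simp
  | cons p items ih =>
      intro d hnd hfresh
      rw [List.map_cons, List.nodup_cons] at hnd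
      rw [List.foldl_cons]
      set d' := p.2.foldl (fun d up => d.modify up PySem.Set.empty (fun s => PySem.Set.add s p.1)) d with hd'
      have hget : ∀ k, d'.getD k PySem.Set.empty
          = if k ∈ p.2 ∧ p.1 ∉ d.getD k PySem.Set.empty
            then d.getD k PySem.Set.empty ++ [p.1] else d.getD k PySem.Set.empty :=
        fun k => pvBuildInner_getD k p.1 p.2 d
      have hfresh' : ∀ q ∈ items, ∀ k, q.1 ∉ d'.getD k PySem.Set.empty := by
        intro q hq k
        rw [hget k]
        have h1 : q.1 ∉ d.getD k PySem.Set.empty := hfresh q (List.mem_cons_of_mem _ hq) k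
        have h2 : q.1 ≠ p.1 := fun h => hnd.1 (h ▸ List.mem_map_of_mem hq)
        split
        · intro hmem
          rcases List.mem_append.mp hmem with h | h
          · exact h1 h
          · exact h2 (by simpa using h)
        · exact h1
      rw [ih d' hnd.2 hfresh', hget cur]
      rw [List.filter_cons]
      by_cases hc : p.2.contains cur = true
      · have hcm : cur ∈ p.2 := by simpa using hc
        rw [if_pos ⟨hcm, hfresh p List.mem_cons_self cur⟩]
        simp [hcm]
      · have hcm : cur ∉ p.2 := by simpa using hc
        rw [if_neg (fun h => hcm h.1)]
        simp [hcm]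

theorem pvBuild_getD (graph : List (String × List String)) (cur : String) :
    (pvBuildDownstream graph).getD cur PySem.Set.empty
      = (((PySem.Dict.ofList graph).items.filter (fun p => p.2.contains cur)).map Prod.fst) := by
  unfold pvBuildDownstream
  have hnd : ((PySem.Dict.ofList graph).items.map Prod.fst).Nodup :=
    PySem.Dict.nodup_keys_ofList graph
  have h := pvBuild_getD_aux cur (PySem.Dict.ofList graph).items PySem.Dict.empty hnd
    (by intro q _ k; rw [PySem.Dict.getD_empty]; exact List.not_mem_nil)
  rw [h, PySem.Dict.getD_empty]
  rfl

-- one B scan over all items = one A fold over the filtered-key list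
theorem pvScan_eq_fold (cur : String) :
    ∀ (items : List (String × List String)) (st : PySem.Set String × List String),
    items.foldl (pvBStep cur) st
      = ((items.filter (fun p => p.2.contains cur)).map Prod.fst).foldl pvStep st := by
  intro items
  induction items with
  | nil => intro st; rfl
  | cons p items ih =>
      intro st
      rw [List.foldl_cons, List.filter_cons]
      by_cases hc : p.2.contains cur = true
      · rw [if_pos hc, List.map_cons, List.foldl_cons]
        have hcm : cur ∈ p.2 := by simpa using hc
        have hstep : pvBStep cur st p = pvStep st p.1 := by
          unfold pvBStep pvStep
          cases h : PySem.Set.contains st.1 p.1 <;> simp [hcm]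
        rw [hstep, ih]
      · rw [if_neg hc]
        have hcm : cur ∉ p.2 := by simpa using hc
        have hstep : pvBStep cur st p = st := by
          unfold pvBStep
          simp [hcm]
        rw [hstep, ih]

-- bisimulation: A's (queue, visited) vs B's (order, i, visited) with order = processed ++ queue, i = |processed|
theorem pvBisim (graph : List (String × List String)) :
    ∀ (fuel : Nat) (processed queue : List String) (v : PySem.Set String),
    pvAQueueLoop (pvBuildDownstream graph) fuel queue v
      = pvBScanLoop (PySem.Dict.ofList graph).items fuel (processed ++ queue) processed.length v := by
  intro fuel
  induction fuel with
  | zero => intro processed queue v; rfl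
  | succ fuel ih =>
      intro processed queue v
      cases queue with
      | nil =>
          show v = pvBScanLoop _ (fuel + 1) (processed ++ []) processed.length v
          rw [pvBScanLoop]
          rw [if_neg (by simp)]
      | cons cur rest =>
          show pvAQueueLoop _ (fuel + 1) (cur :: rest) v = _
          rw [pvAQueueLoop, pvBScanLoop]
          rw [if_pos (by simp)]
          have hcur : (processed ++ cur :: rest).getD processed.length "" = cur := by
            simp [List.getD_eq_getElem?_getD]
          rw [hcur]
          have hfoldB : (PySem.Dict.ofList graph).items.foldl
              (fun (st : PySem.Set String × List String) p =>
                if PySem.Set.contains st.1 p.1 = false ∧ p.2.contains cur = true then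
                  (PySem.Set.add st.1 p.1, st.2 ++ [p.1])
                else st)
              (v, processed ++ cur :: rest)
              = (PySem.Dict.ofList graph).items.foldl (pvBStep cur) (v, processed ++ cur :: rest) := rfl
          have hfoldA : ((pvBuildDownstream graph).getD cur PySem.Set.empty).foldl
              (fun (st : PySem.Set String × List String) child =>
                if PySem.Set.contains st.1 child then st
                else (PySem.Set.add st.1 child, st.2 ++ [child]))
              (v, rest)
              = ((pvBuildDownstream graph).getD cur PySem.Set.empty).foldl pvStep (v, rest) := rfl
          simp only [hfoldA, hfoldB]
          rw [pvScan_eq_fold cur, ← pvBuild_getD graph cur]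
          set L := (pvBuildDownstream graph).getD cur PySem.Set.empty with hL
          have hsplit : (processed ++ cur :: rest) = (processed ++ [cur]) ++ rest := by simp
          rw [hsplit, foldl_pvStep_acc L v (processed ++ [cur]) rest]
          have := ih (processed ++ [cur]) (L.foldl pvStep (v, rest)).2 (L.foldl pvStep (v, rest)).1
          simp only [List.length_append, List.length_cons, List.length_nil] at this ⊢
          exact this

-- ===== VERDICT (by name: the statement is the Claim_ definition above) =====
theorem get_transitive_downstream_py_spec : Claim_equal_get_transitive_downstream_py := by
  intro graph nodes _
  unfold Spec_get_transitive_downstream_py get_transitive_downstream_py get_transitive_downstream_py_alt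
  have h := pvBisim graph (nodes.length + graph.length) [] nodes PySem.Set.empty
  simpa using h
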